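-- pv_equiv track=rewrite | github.com/Boot-Camp-Coding-Test/second_day_practice | problem2/[노태윤]개발실패ㅠㅠ.py | solution
-- ===== SOURCE A (Python) =====
-- def solution(progresses, speeds) :
--     answer = []
--     days = [0] * len(progresses)
--     zipped = list(zip(progresses,speeds,days))
--     new_zipped = list(map(list,zipped))
--     count=0
--     while True :
--         for i in range(len(new_zipped)) :
--             if new_zipped[i][0] >= 100 :
--                 continue
--
--             new_zipped[i][0]+=new_zipped[i][1]
--             new_zipped[i][2]+=1
--             if new_zipped[i][0] >= 100 :
--                 new_zipped[i][0] = 100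
--                 count+=1
--
--         if count == len(new_zipped) :
--             break
--
--     answer.append(1)
--     for j in range(0,len(new_zipped)) :
--         if j == 0 :
--             continue
--         if new_zipped[j][2] <= new_zipped[j-1][2] :
--             answer[-1]+=1
--         else :
--             answer.append(1)
--
--     return answer
-- ===== SOURCE B (Python) =====
-- def solution(progresses, speeds):
--     # closed-form days per task (ceiling division) instead of day-by-day simulation,
--     # then group by comparing consecutive day counts.
--     days = [-((p - 100) // s) for p, s in zip(progresses, speeds)]
--     answer = [1]
--     for prev, d in zip(days, days[1:]):
--         if d <= prev:
--             answer[-1] += 1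
--         else:
--             answer.append(1)
--     return answer
-- ===== Notes on version B (the rewrite author's own statement) =====
-- stated objective: alternative
-- what changed: B replaces A's day-by-day while-loop simulation of every task with a closed-form ceiling division computing each task's finish day, then groups consecutive day counts in one pass.
-- outside the precondition, e.g. on solution([-50], [1]): A returns [1], B returns [1]
import Mathlib
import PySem

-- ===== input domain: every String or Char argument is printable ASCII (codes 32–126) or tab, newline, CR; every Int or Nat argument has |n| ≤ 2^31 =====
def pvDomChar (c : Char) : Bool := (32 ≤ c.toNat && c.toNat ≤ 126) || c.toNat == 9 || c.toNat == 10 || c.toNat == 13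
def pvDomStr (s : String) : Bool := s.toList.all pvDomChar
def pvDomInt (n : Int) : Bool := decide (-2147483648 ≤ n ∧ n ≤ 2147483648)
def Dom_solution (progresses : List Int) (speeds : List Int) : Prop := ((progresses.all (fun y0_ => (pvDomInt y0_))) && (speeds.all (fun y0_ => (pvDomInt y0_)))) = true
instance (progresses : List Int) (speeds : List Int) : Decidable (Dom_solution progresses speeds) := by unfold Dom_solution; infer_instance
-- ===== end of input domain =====

-- B replaces A's day-by-day simulation by a closed-form ceiling division for each task's
-- finish day, then does the same single grouping pass; equivalence is on return values only.

-- ===== PORT A =====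
-- one pass of A's inner `for i in range(len(new_zipped))` loop: returns updated list and count
def dayA : List (Int × Int × Int) → Int → List (Int × Int × Int) × Int
  | [], c => ([], c)
  | (p, s, d) :: rest, c =>
    if 100 ≤ p then
      let r := dayA rest c
      ((p, s, d) :: r.1, r.2)
    else
      let p' := p + s
      let d' := d + 1
      if 100 ≤ p' then
        let r := dayA rest (c + 1)
        ((100, s, d') :: r.1, r.2)
      else
        let r := dayA rest c
        ((p', s, d') :: r.1, r.2)

-- A's `while True` loop; fuel only makes it total (A diverges outside Pre_; 101 days
-- always suffice inside Pre_, where every task finishes within 100 days)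
def loopA : Nat → List (Int × Int × Int) → Int → List (Int × Int × Int)
  | 0, L, _ => L
  | fuel + 1, L, c =>
    let r := dayA L c
    if r.2 = (r.1.length : Int) then r.1 else loopA fuel r.1 r.2

-- A's answer loop; `answer[-1] += 1` is ported as dropLast ++ [last + 1]
def ansLoopA : List Int → Int → List Int → List Int
  | answer, _, [] => answer
  | answer, prev, d :: rest =>
    ansLoopA (if d ≤ prev then answer.dropLast ++ [answer.getLastD 0 + 1] else answer ++ [1]) d rest

def solution (progresses : List Int) (speeds : List Int) : List Int :=
  let zipped := progresses.zip speeds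
  let L := loopA 101 (zipped.map (fun x => (x.1, x.2, (0 : Int)))) 0
  let ds := L.map (fun t => t.2.2)
  match ds with
  | [] => [1]
  | d0 :: rest => ansLoopA [1] d0 rest

-- ===== PORT B =====
-- B's grouping loop over zip(days, days[1:]); `answer[-1] += 1` as dropLast ++ [last + 1]
def loopB : List Int → List (Int × Int) → List Int
  | answer, [] => answer
  | answer, (prev, d) :: rest =>
    loopB (if d ≤ prev then answer.dropLast ++ [answer.getLastD 0 + 1] else answer ++ [1]) rest

def solution_alt (progresses : List Int) (speeds : List Int) : List Int :=
  let days := (progresses.zip speeds).map (fun x => -(PySem.Int.floordiv (x.1 - 100) x.2))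
  loopB [1] (days.zip days.tail)

-- ===== PRECONDITION & SPEC =====
-- Pre_ is the task's natural domain (progresses are percentages 0..99, speeds positive):
-- with a zipped pair p ≥ 100 or s ≤ 0 A's while-loop never terminates; 0 ≤ p additionally
-- excludes negative progress, on which A still returns (after ~|p|/s simulated days) and
-- agrees with B, but which lies outside the stated task domain.
def Pre_solution (progresses : List Int) (speeds : List Int) : Prop :=
  ∀ x ∈ progresses.zip speeds, 0 ≤ x.1 ∧ x.1 < 100 ∧ 1 ≤ x.2
instance (progresses : List Int) (speeds : List Int) : Decidable (Pre_solution progresses speeds) := by unfold Pre_solution; infer_instance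

def pvWitness_solution : List Int × List Int := ([93, 30, 55], [1, 30, 5])

def Spec_solution (progresses : List Int) (speeds : List Int) (out : List Int) : Prop := out = solution_alt progresses speeds
instance (progresses : List Int) (speeds : List Int) (out : List Int) : Decidable (Spec_solution progresses speeds out) := by unfold Spec_solution; infer_instance

-- ===== CLAIM (what is proved, stated in full; the proofs are below) =====
def Claim_equal_solution : Prop := ∀ (progresses : List Int) (speeds : List Int), Dom_solution progresses speeds → Pre_solution progresses speeds → Spec_solution progresses speeds (solution progresses speeds)

-- ===== LEMMAS AND PROOFS =====

-- finish day of a single task: dOf p s = ceil((100 - p) / s), exactly B's expression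
def dOf (p s : Int) : Int := -(PySem.Int.floordiv (p - 100) s)

-- the per-task invariant Pre_ gives
def okPair (x : Int × Int) : Prop := 0 ≤ x.1 ∧ x.1 < 100 ∧ 1 ≤ x.2

-- state of one task after k simulated days
def gSt (k : Nat) (x : Int × Int) : Int × Int × Int :=
  if dOf x.1 x.2 ≤ (k : Int) then (100, x.2, dOf x.1 x.2) else (x.1 + k * x.2, x.2, (k : Int))

-- number of tasks finished within k days
def finCnt (k : Nat) (zs : List (Int × Int)) : Int :=
  (zs.countP (fun x => decide (dOf x.1 x.2 ≤ (k : Int))) : Int)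

lemma dOf_bracket (p s : Int) (hs : 0 < s) :
    (dOf p s - 1) * s < 100 - p ∧ 100 - p ≤ dOf p s * s := by
  have he : dOf p s = -(PySem.Int.floordiv (-(100 - p)) s) := by unfold dOf; ring_nf
  have h := (PySem.Int.neg_floordiv_neg_eq_iff_of_pos (a := 100 - p) (b := s)
      (q := dOf p s) hs).mp he.symm
  exact h

lemma reach_iff (p s : Int) (_hp : p < 100) (hs : 1 ≤ s) (k : Int) :
    100 ≤ p + k * s ↔ dOf p s ≤ k := by
  obtain ⟨h1, h2⟩ := dOf_bracket p s (by omega)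
  constructor
  · intro h
    by_contra hc
    have hk : k ≤ dOf p s - 1 := by omega
    have : k * s ≤ (dOf p s - 1) * s := by
      exact mul_le_mul_of_nonneg_right hk (by omega)
    omega
  · intro h
    have : dOf p s * s ≤ k * s := mul_le_mul_of_nonneg_right h (by omega)
    omega

lemma dOf_pos (p s : Int) (hp : p < 100) (hs : 1 ≤ s) : 1 ≤ dOf p s := by
  obtain ⟨h1, h2⟩ := dOf_bracket p s (by omega)
  by_contra hc
  have hk : dOf p s ≤ 0 := by omega
  have : dOf p s * s ≤ 0 := mul_nonpos_iff.mpr (Or.inr ⟨hk, by omega⟩)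
  omega

lemma dOf_le_100 (p s : Int) (hp0 : 0 ≤ p) (hp : p < 100) (hs : 1 ≤ s) : dOf p s ≤ 100 := by
  obtain ⟨h1, h2⟩ := dOf_bracket p s (by omega)
  have hd1 : 0 ≤ dOf p s - 1 := by have := dOf_pos p s hp hs; omega
  have : (dOf p s - 1) * 1 ≤ (dOf p s - 1) * s := by
    exact mul_le_mul_of_nonneg_left hs hd1
  omega

-- one simulated day on the invariant state
lemma dayA_g (k : Nat) (zs : List (Int × Int)) (hok : ∀ x ∈ zs, okPair x) (c : Int) :
    dayA (zs.map (gSt k)) c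
      = (zs.map (gSt (k + 1)), c + (zs.countP (fun x => decide (dOf x.1 x.2 = (k : Int) + 1)) : Int)) := by
  induction zs generalizing c with
  | nil => simp [dayA]
  | cons x rest ih =>
    obtain ⟨hx0, hx1, hx2⟩ := hok x List.mem_cons_self
    have ihr := ih (fun y hy => hok y (List.mem_cons_of_mem _ hy))
    obtain ⟨p, s⟩ := x
    have hreach := reach_iff p s hx1 hx2
    have hDpos := dOf_pos p s hx1 hx2
    rw [List.map_cons, List.map_cons, List.countP_cons]
    by_cases hfin : dOf p s ≤ (k : Int)
    · have h1 : gSt k (p, s) = (100, s, dOf p s) := by unfold gSt; rw [if_pos hfin]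
      have h2 : gSt (k + 1) (p, s) = (100, s, dOf p s) := by
        unfold gSt; rw [if_pos (by push_cast; omega)]
      have hne : (decide (dOf p s = (k : Int) + 1)) = false := by
        simp only [decide_eq_false_iff_not]; omega
      rw [h1, h2]
      simp only [dayA]
      rw [if_pos (by norm_num : (100 : Int) ≤ 100), ihr c]
      simp [hne]
    · have h1 : gSt k (p, s) = (p + (k : Int) * s, s, (k : Int)) := by unfold gSt; rw [if_neg hfin]
      have hlt : ¬ 100 ≤ p + (k : Int) * s := fun h => hfin ((hreach _).mp h)
      rw [h1]
      simp only [dayA]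
      rw [if_neg hlt]
      by_cases hcross : dOf p s ≤ (k : Int) + 1
      · have heq : dOf p s = (k : Int) + 1 := le_antisymm hcross (by omega)
        have hcr : 100 ≤ p + (k : Int) * s + s := by
          have h := (hreach ((k : Int) + 1)).mpr hcross
          have he : p + ((k : Int) + 1) * s = p + (k : Int) * s + s := by ring
          omega
        have h2 : gSt (k + 1) (p, s) = (100, s, (k : Int) + 1) := by
          unfold gSt; rw [if_pos (by push_cast; omega), heq]
        rw [if_pos hcr, ihr (c + 1), h2]
        have hT : (decide (dOf p s = (k : Int) + 1)) = true := by simp [heq]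
        simp [hT]
        omega
      · have hcr : ¬ 100 ≤ p + (k : Int) * s + s := by
          intro h
          have he : p + ((k : Int) + 1) * s = p + (k : Int) * s + s := by ring
          exact hcross ((hreach ((k : Int) + 1)).mp (by omega))
        have h2 : gSt (k + 1) (p, s) = (p + ((k : Int) + 1) * s, s, (k : Int) + 1) := by
          unfold gSt; rw [if_neg (by push_cast; omega)]; push_cast; ring_nf
        have hne : (decide (dOf p s = (k : Int) + 1)) = false := by
          simp only [decide_eq_false_iff_not]; omega
        rw [if_neg hcr, ihr c, h2]
        simp [hne]
        ring

lemma finCnt_succ (k : Nat) (zs : List (Int × Int)) :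
    finCnt (k + 1) zs = finCnt k zs + (zs.countP (fun x => decide (dOf x.1 x.2 = (k : Int) + 1)) : Int) := by
  induction zs with
  | nil => simp [finCnt]
  | cons x rest ih =>
    simp only [finCnt, List.countP_cons] at *
    push_cast
    push_cast at ih
    by_cases h1 : dOf x.1 x.2 ≤ (k : Int)
    · have h2 : dOf x.1 x.2 ≤ ((k : Int) + 1) := by omega
      have h3 : ¬ dOf x.1 x.2 = (k : Int) + 1 := by omega
      simp [h1, h2, h3]; omega
    · by_cases h2 : dOf x.1 x.2 = (k : Int) + 1
      · have h3 : dOf x.1 x.2 ≤ ((k : Int) + 1) := by omega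
        simp [h2]; omega
      · have h3 : ¬ dOf x.1 x.2 ≤ ((k : Int) + 1) := by omega
        simp [h1, h2, h3]; omega

lemma loopA_spec (fuel : Nat) : ∀ (k : Nat) (zs : List (Int × Int)),
    (∀ x ∈ zs, okPair x) → (∀ x ∈ zs, dOf x.1 x.2 ≤ (k : Int) + (fuel : Int)) →
    (loopA fuel (zs.map (gSt k)) (finCnt k zs)).map (fun t => t.2.2)
      = zs.map (fun x => dOf x.1 x.2) := by
  induction fuel with
  | zero =>
    intro k zs hok hb
    simp only [loopA, List.map_map]
    apply List.map_congr_left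
    intro x hx
    have h1 := hb x hx
    have h2 : dOf x.1 x.2 ≤ (k : Int) := by push_cast at h1; omega
    simp only [Function.comp, gSt]
    rw [if_pos h2]
  | succ fuel ih =>
    intro k zs hok hb
    simp only [loopA]
    rw [dayA_g k zs hok]
    rw [← finCnt_succ]
    simp only [List.length_map]
    by_cases hstop : finCnt (k + 1) zs = (zs.length : Int)
    · rw [if_pos hstop]
      have hall : ∀ x ∈ zs, dOf x.1 x.2 ≤ ((k : Int) + 1) := by
        have hcnt : zs.countP (fun x => decide (dOf x.1 x.2 ≤ ((k : Nat) + 1 : Nat))) = zs.length := by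
          unfold finCnt at hstop
          exact_mod_cast hstop
        intro x hx
        have := List.countP_eq_length.mp hcnt x hx
        push_cast at this ⊢
        simpa using of_decide_eq_true this
      simp only [List.map_map]
      apply List.map_congr_left
      intro x hx
      have hx1 := hall x hx
      have hx2 : dOf x.1 x.2 ≤ ((k + 1 : Nat) : Int) := by push_cast; omega
      simp only [Function.comp, gSt]
      rw [if_pos hx2]
    · rw [if_neg hstop]
      exact ih (k + 1) zs hok (by intro x hx; have := hb x hx; push_cast at this ⊢; omega)

-- A's initial list is the day-0 invariant state
lemma init_eq_g0 (zs : List (Int × Int)) (hok : ∀ x ∈ zs, okPair x) :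
    zs.map (fun x => (x.1, x.2, (0 : Int))) = zs.map (gSt 0) := by
  apply List.map_congr_left
  intro x hx
  obtain ⟨h0, h1, h2⟩ := hok x hx
  have h3 := dOf_pos x.1 x.2 h1 h2
  unfold gSt
  rw [if_neg (by push_cast; omega)]
  simp

lemma finCnt_zero (zs : List (Int × Int)) (hok : ∀ x ∈ zs, okPair x) : finCnt 0 zs = 0 := by
  unfold finCnt
  rw [List.countP_eq_zero.mpr ?_]
  · simp
  · intro x hx
    obtain ⟨h0, h1, h2⟩ := hok x hx
    have := dOf_pos x.1 x.2 h1 h2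
    simp only [decide_eq_true_eq, not_le]
    push_cast
    omega

-- B's pairwise grouping over zip(days, days[1:]) equals A's answer loop over the day list
lemma loopB_eq_ans (rest : List Int) : ∀ (answer : List Int) (d0 : Int),
    loopB answer ((d0 :: rest).zip rest) = ansLoopA answer d0 rest := by
  induction rest with
  | nil => intro answer d0; simp [loopB, ansLoopA]
  | cons d1 rs ih =>
    intro answer d0
    simp only [List.zip_cons_cons, loopB, ansLoopA]
    exact ih _ d1

-- ===== VERDICT (by name: the statement is the Claim_ definition above) =====
theorem solution_spec : Claim_equal_solution := by
  intro progresses speeds _ hpre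
  unfold Spec_solution
  have hok : ∀ x ∈ progresses.zip speeds, okPair x := hpre
  have hb : ∀ x ∈ progresses.zip speeds, dOf x.1 x.2 ≤ ((0 : Nat) : Int) + ((101 : Nat) : Int) := by
    intro x hx
    obtain ⟨h0, h1, h2⟩ := hpre x hx
    have := dOf_le_100 x.1 x.2 h0 h1 h2
    push_cast
    omega
  have hds : (loopA 101 ((progresses.zip speeds).map (fun x => (x.1, x.2, (0 : Int)))) 0).map (fun t => t.2.2)
      = (progresses.zip speeds).map (fun x => dOf x.1 x.2) := by
    rw [init_eq_g0 _ hok, ← finCnt_zero _ hok]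
    exact loopA_spec 101 0 _ hok hb
  rcases hzs : progresses.zip speeds with _ | ⟨⟨p, s⟩, zr⟩
  · rw [hzs] at hds
    simp [solution, solution_alt, hzs, loopA, dayA, loopB]
  · rw [hzs] at hds
    simp only [List.map_cons] at hds
    simp only [solution, solution_alt, hzs, List.map_cons]
    rw [hds]
    simp only [List.tail_cons]
    rw [loopB_eq_ans]
    simp [dOf]
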